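-- pv_equiv track=rewrite | github.com/nicolaCirillo/lod4term | terms2lod/terms2lod.py | only_longest
-- ===== SOURCE A (Python) =====
-- def only_longest(ents):
--     filtered = dict()
--     all_spans = [(spans[0][0], spans[-1][1]) for _, _, spans in ents.values()]
--     for k, v in ents.items():
--         spans = v[-1]
--         b, e = spans[0][0], spans[-1][1]
--         if not any((b >= bb and e < ee) or (b > bb and e <= ee) for bb, ee in all_spans):
--             filtered[k] = v
--     return filtered
-- ===== SOURCE B (Python) =====
-- def only_longest(ents):
--     def bound(v):
--         spans = v[-1]
--         return (spans[0][0], spans[-1][1])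
--     order = sorted({bound(v) for v in ents.values()}, key=lambda p: (p[0], -p[1]))
--     contained = set()
--     max_end = None
--     for b, e in order:
--         if max_end is not None and e <= max_end:
--             contained.add((b, e))
--         else:
--             max_end = e
--     return {k: v for k, v in ents.items() if bound(v) not in contained}
-- ===== Notes on version B (the rewrite author's own statement) =====
-- stated objective: faster
-- what changed: A checks every entity's span against all n spans (quadratic any-scan); B sorts the distinct (start,end) pairs by start ascending / end descending and does one sweep tracking the maximum end to mark strictly contained pairs, then filters the dict once.
import Mathlib
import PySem

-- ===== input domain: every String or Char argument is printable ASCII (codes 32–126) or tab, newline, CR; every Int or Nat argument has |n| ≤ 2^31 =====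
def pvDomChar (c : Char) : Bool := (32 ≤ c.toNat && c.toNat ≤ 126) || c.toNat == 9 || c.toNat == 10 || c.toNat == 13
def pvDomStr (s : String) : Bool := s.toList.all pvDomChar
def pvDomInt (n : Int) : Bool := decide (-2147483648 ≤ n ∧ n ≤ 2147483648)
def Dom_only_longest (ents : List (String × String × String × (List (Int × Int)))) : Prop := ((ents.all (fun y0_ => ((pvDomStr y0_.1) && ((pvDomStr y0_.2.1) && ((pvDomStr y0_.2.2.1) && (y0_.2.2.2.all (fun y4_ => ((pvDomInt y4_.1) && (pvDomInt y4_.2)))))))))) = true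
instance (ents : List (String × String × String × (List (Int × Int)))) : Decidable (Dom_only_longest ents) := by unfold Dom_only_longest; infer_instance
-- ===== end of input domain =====

-- B replaces A's quadratic any-scan by sort-distinct-pairs + one max-end sweep, then a single filter.

-- (spans[0][0], spans[-1][1]); both Pythons compute this same expression (exact on nonempty spans,
-- which Pre_ guarantees; the .getD default is never reached inside Pre_).
def pvBound (spans : List (Int × Int)) : Int × Int :=
  (((PySem.List.pyGet? spans 0).getD (0, 0)).1, ((PySem.List.pyGet? spans (-1)).getD (0, 0)).2)

-- ===== PORT A =====
def only_longest (ents : List (String × String × String × (List (Int × Int)))) : List (String × String × String × (List (Int × Int))) :=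
  let all_spans := ents.map (fun kv => pvBound kv.2.2.2)
  ents.foldl
    (fun filtered kv =>
      if all_spans.any (fun q => ((pvBound kv.2.2.2).1 ≥ q.1 && (pvBound kv.2.2.2).2 < q.2) || ((pvBound kv.2.2.2).1 > q.1 && (pvBound kv.2.2.2).2 ≤ q.2))
      then filtered
      else filtered ++ [kv])   -- filtered[k] = v : keys are distinct inside Pre_, so dict insert = append
    []

-- ===== PORT B =====
-- the sweep loop: max_end is `none` before the first element; strictly contained pairs go into the set
def pvSweep : List (Int × Int) → Option Int → PySem.Set (Int × Int) → PySem.Set (Int × Int)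
  | [], _, contained => contained
  | p :: rest, m, contained =>
    match m with
    | some me =>
      if p.2 ≤ me then pvSweep rest (some me) (PySem.Set.add contained p)
      else pvSweep rest (some p.2) contained
    | none => pvSweep rest (some p.2) contained

def only_longest_alt (ents : List (String × String × String × (List (Int × Int)))) : List (String × String × String × (List (Int × Int))) :=
  -- sorted({bound(v) for v in ents.values()}, key=lambda p: (p[0], -p[1])): Python's tuple key is lexicographic
  let order := PySem.List.sorted (PySem.Set.ofList (ents.map (fun kv => pvBound kv.2.2.2)))
                 (fun p => (toLex ((p.1, -p.2) : Int × Int) : Int ×ₗ Int))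
  let contained := pvSweep order none PySem.Set.empty
  ents.filter (fun kv => !(PySem.Set.contains contained (pvBound kv.2.2.2)))

-- ===== PRECONDITION & SPEC =====
-- Pre_ excludes (i) entities with an empty span list, on which A raises IndexError, and
-- (ii) assoc lists with duplicate keys, which do not encode a Python dict (dict construction
-- collapses them before A runs, so first-vs-last there is an artefact of the encoding).
def Pre_only_longest (ents : List (String × String × String × (List (Int × Int)))) : Prop :=
  (∀ kv ∈ ents, kv.2.2.2 ≠ []) ∧ (ents.map (fun kv => kv.1)).Nodup
instance (ents : List (String × String × String × (List (Int × Int)))) : Decidable (Pre_only_longest ents) := by unfold Pre_only_longest; infer_instance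

def pvWitness_only_longest : (List (String × String × String × (List (Int × Int)))) :=
  [("e1", "x", "PER", [(0, 3)]), ("e2", "y", "LOC", [(1, 2), (4, 5)]), ("e3", "z", "ORG", [(0, 3)])]

def Spec_only_longest (ents : List (String × String × String × (List (Int × Int)))) (out : List (String × String × String × (List (Int × Int)))) : Prop := out = only_longest_alt ents
instance (ents : List (String × String × String × (List (Int × Int)))) (out : List (String × String × String × (List (Int × Int)))) : Decidable (Spec_only_longest ents out) := by unfold Spec_only_longest; infer_instance

-- ===== CLAIM (what is proved, stated in full; the proofs are below) =====
def Claim_equal_only_longest : Prop := ∀ (ents : List (String × String × String × (List (Int × Int)))), Dom_only_longest ents → Pre_only_longest ents → Spec_only_longest ents (only_longest ents)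

-- ===== LEMMAS AND PROOFS =====

-- strict order on pairs induced by the sort key (p.1, -p.2)
def pvKeyLt (a b : Int × Int) : Prop := a.1 < b.1 ∨ (a.1 = b.1 ∧ b.2 < a.2)

-- the sweep's characterisation: on a list strictly sorted by the key,
-- p lands in the output set iff it was already in `contained`, or it occurs in l and is
-- (given the running max `m`) strictly contained in some other interval of l.
theorem pvSweep_mem (l : List (Int × Int)) (m : Option Int) (contained : PySem.Set (Int × Int))
    (p : Int × Int) (hs : l.Pairwise pvKeyLt) :
    (p ∈ pvSweep l m contained ↔
      p ∈ contained ∨ (p ∈ l ∧ ((∃ me, m = some me ∧ p.2 ≤ me) ∨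
        ∃ q ∈ l, q ≠ p ∧ q.1 ≤ p.1 ∧ p.2 ≤ q.2))) := by
  induction l generalizing m contained with
  | nil => simp [pvSweep]
  | cons q rest ih =>
    have hq : ∀ x ∈ rest, pvKeyLt q x := (List.pairwise_cons.mp hs).1
    have hrest : rest.Pairwise pvKeyLt := (List.pairwise_cons.mp hs).2
    have hF1 : p ∈ rest → q ≠ p ∧ q.1 ≤ p.1 := by
      intro hpr
      have := hq p hpr
      unfold pvKeyLt at this
      constructor
      · rintro rfl; rcases this with h | ⟨_, h⟩ <;> omega
      · rcases this with h | ⟨h, _⟩ <;> omega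
    have hF2 : ∀ x ∈ rest, ¬(x.1 ≤ q.1 ∧ q.2 ≤ x.2) := by
      intro x hx
      have := hq x hx
      unfold pvKeyLt at this
      rintro ⟨h1, h2⟩; rcases this with h | ⟨h, h'⟩ <;> omega
    have hqnr : q ∉ rest := by
      intro hqq
      have := hq q hqq
      unfold pvKeyLt at this
      rcases this with h | ⟨_, h⟩ <;> omega
    rcases m with _ | me
    · -- m = none
      rw [show pvSweep (q :: rest) none contained = pvSweep rest (some q.2) contained from rfl,
          ih _ _ hrest]
      constructor
      · rintro (h | ⟨hpr, h2 | ⟨x, hx, hne, hcov⟩⟩)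
        · exact Or.inl h
        · rcases h2 with ⟨me, hme, hle⟩
          cases Option.some.inj hme
          exact Or.inr ⟨List.mem_cons_of_mem _ hpr, Or.inr ⟨q, List.mem_cons_self .., (hF1 hpr).1, (hF1 hpr).2, hle⟩⟩
        · exact Or.inr ⟨List.mem_cons_of_mem _ hpr, Or.inr ⟨x, List.mem_cons_of_mem _ hx, hne, hcov⟩⟩
      · rintro (h | ⟨hpl, ⟨me, hme, _⟩ | ⟨x, hxmem, hne, hcov⟩⟩)
        · exact Or.inl h
        · exact absurd hme (by simp)
        · rcases List.mem_cons.mp hpl with rfl | hpr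
          · rcases List.mem_cons.mp hxmem with rfl | hxr
            · exact absurd rfl hne
            · exact absurd ⟨hcov.1, hcov.2⟩ (hF2 x hxr)
          · refine Or.inr ⟨hpr, ?_⟩
            rcases List.mem_cons.mp hxmem with rfl | hxr
            · exact Or.inl ⟨x.2, rfl, hcov.2⟩
            · exact Or.inr ⟨x, hxr, hne, hcov⟩
    · -- m = some me
      by_cases hbr : q.2 ≤ me
      · rw [show pvSweep (q :: rest) (some me) contained
              = pvSweep rest (some me) (PySem.Set.add contained q) from by simp [pvSweep, hbr],
            ih _ _ hrest]
        constructor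
        · rintro (h | ⟨hpr, h2 | ⟨x, hx, hne, hcov⟩⟩)
          · rcases (PySem.Set.mem_add _ _ _).mp h with h' | rfl
            · exact Or.inl h'
            · exact Or.inr ⟨List.mem_cons_self .., Or.inl ⟨me, rfl, hbr⟩⟩
          · rcases h2 with ⟨me', hme', hle⟩
            cases Option.some.inj hme'
            exact Or.inr ⟨List.mem_cons_of_mem _ hpr, Or.inl ⟨me, rfl, hle⟩⟩
          · exact Or.inr ⟨List.mem_cons_of_mem _ hpr, Or.inr ⟨x, List.mem_cons_of_mem _ hx, hne, hcov⟩⟩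
        · rintro (h | ⟨hpl, ⟨me', hme', hle⟩ | ⟨x, hxmem, hne, hcov⟩⟩)
          · exact Or.inl ((PySem.Set.mem_add _ _ _).mpr (Or.inl h))
          · cases Option.some.inj hme'
            rcases List.mem_cons.mp hpl with rfl | hpr
            · exact Or.inl ((PySem.Set.mem_add _ _ _).mpr (Or.inr rfl))
            · exact Or.inr ⟨hpr, Or.inl ⟨me, rfl, hle⟩⟩
          · rcases List.mem_cons.mp hpl with rfl | hpr
            · exact Or.inl ((PySem.Set.mem_add _ _ _).mpr (Or.inr rfl))
            · refine Or.inr ⟨hpr, ?_⟩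
              rcases List.mem_cons.mp hxmem with rfl | hxr
              · exact Or.inl ⟨me, rfl, by omega⟩
              · exact Or.inr ⟨x, hxr, hne, hcov⟩
      · rw [show pvSweep (q :: rest) (some me) contained
              = pvSweep rest (some q.2) contained from by simp [pvSweep, hbr],
            ih _ _ hrest]
        constructor
        · rintro (h | ⟨hpr, h2 | ⟨x, hx, hne, hcov⟩⟩)
          · exact Or.inl h
          · rcases h2 with ⟨me', hme', hle⟩
            cases Option.some.inj hme'
            exact Or.inr ⟨List.mem_cons_of_mem _ hpr, Or.inr ⟨q, List.mem_cons_self .., (hF1 hpr).1, (hF1 hpr).2, hle⟩⟩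
          · exact Or.inr ⟨List.mem_cons_of_mem _ hpr, Or.inr ⟨x, List.mem_cons_of_mem _ hx, hne, hcov⟩⟩
        · rintro (h | ⟨hpl, ⟨me', hme', hle⟩ | ⟨x, hxmem, hne, hcov⟩⟩)
          · exact Or.inl h
          · cases Option.some.inj hme'
            rcases List.mem_cons.mp hpl with rfl | hpr
            · omega
            · exact Or.inr ⟨hpr, Or.inl ⟨q.2, rfl, by omega⟩⟩
          · rcases List.mem_cons.mp hpl with rfl | hpr
            · rcases List.mem_cons.mp hxmem with rfl | hxr
              · exact absurd rfl hne
              · exact absurd ⟨hcov.1, hcov.2⟩ (hF2 x hxr)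
            · refine Or.inr ⟨hpr, ?_⟩
              rcases List.mem_cons.mp hxmem with rfl | hxr
              · exact Or.inl ⟨x.2, rfl, hcov.2⟩
              · exact Or.inr ⟨x, hxr, hne, hcov⟩

-- A's foldl builds exactly the filtered list
theorem pvFoldl_filter (c : (String × String × String × (List (Int × Int))) → Bool)
    (l acc : List (String × String × String × (List (Int × Int)))) :
    l.foldl (fun filtered kv => if c kv then filtered else filtered ++ [kv]) acc
      = acc ++ l.filter (fun kv => !c kv) := by
  induction l generalizing acc with
  | nil => simp
  | cons kv rest ih =>
    by_cases h : c kv = true <;> simp [List.foldl, h, ih]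


-- the sorted list of distinct pairs is strictly ordered by the key (p.1, -p.2)
theorem pvOrder_pairwise (xs : List (Int × Int)) :
    (PySem.List.sorted (PySem.Set.ofList xs)
      (fun p => (toLex ((p.1, -p.2) : Int × Int) : Int ×ₗ Int))).Pairwise pvKeyLt := by
  have h1 := PySem.List.sorted_pairwise (PySem.Set.ofList xs)
      (fun p => (toLex ((p.1, -p.2) : Int × Int) : Int ×ₗ Int))
  have h2 : (PySem.List.sorted (PySem.Set.ofList xs)
      (fun p => (toLex ((p.1, -p.2) : Int × Int) : Int ×ₗ Int)) (reverse := false)).Nodup :=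
    ((PySem.List.sorted_perm _ _ _).nodup_iff).mpr (PySem.Set.nodup_ofList xs)
  refine (h1.and h2).imp ?_
  rintro a b ⟨hle, hne⟩
  unfold pvKeyLt
  rcases lt_or_eq_of_le hle with hlt | heq
  · rcases Prod.Lex.toLex_lt_toLex.mp hlt with h | ⟨h, h'⟩
    · exact Or.inl h
    · exact Or.inr ⟨h, by omega⟩
  · exfalso
    have h3 : ((a.1, -a.2) : Int × Int) = (b.1, -b.2) := toLex_inj.mp heq
    rw [Prod.ext_iff] at h3
    exact hne (Prod.ext h3.1 (by have := h3.2; simpa using by omega))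

-- A's any-scan decides exactly membership in B's contained set
theorem pvAny_eq_contains (ents : List (String × String × String × (List (Int × Int))))
    (kv : String × String × String × (List (Int × Int))) (hkv : kv ∈ ents) :
    ((ents.map (fun kv => pvBound kv.2.2.2)).any
        (fun q => ((pvBound kv.2.2.2).1 ≥ q.1 && (pvBound kv.2.2.2).2 < q.2) ||
                  ((pvBound kv.2.2.2).1 > q.1 && (pvBound kv.2.2.2).2 ≤ q.2)))
      = PySem.Set.contains
          (pvSweep (PySem.List.sorted (PySem.Set.ofList (ents.map (fun kv => pvBound kv.2.2.2)))
              (fun p => (toLex ((p.1, -p.2) : Int × Int) : Int ×ₗ Int))) none PySem.Set.empty)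
          (pvBound kv.2.2.2) := by
  rw [Bool.eq_iff_iff]
  have hmem := pvSweep_mem (PySem.List.sorted (PySem.Set.ofList (ents.map (fun kv => pvBound kv.2.2.2)))
      (fun p => (toLex ((p.1, -p.2) : Int × Int) : Int ×ₗ Int))) none PySem.Set.empty
      (pvBound kv.2.2.2) (pvOrder_pairwise _)
  simp only [PySem.Set.contains, List.contains_iff_mem]
  rw [hmem]
  simp only [PySem.Set.empty, List.not_mem_nil, false_or, PySem.List.mem_sorted,
    PySem.Set.mem_ofList, List.mem_map, List.any_eq_true, reduceCtorEq,
    false_and, exists_false, Bool.or_eq_true, Bool.and_eq_true, decide_eq_true_eq]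
  constructor
  · rintro ⟨q, ⟨a, ha, rfl⟩, hc⟩
    refine ⟨⟨kv, hkv, rfl⟩, pvBound a.2.2.2, ⟨a, ha, rfl⟩, ?_, ?_, ?_⟩
    · intro h
      rw [Prod.ext_iff] at h
      rcases hc with ⟨h1, h2⟩ | ⟨h1, h2⟩ <;> omega
    · rcases hc with ⟨h1, h2⟩ | ⟨h1, h2⟩ <;> omega
    · rcases hc with ⟨h1, h2⟩ | ⟨h1, h2⟩ <;> omega
  · rintro ⟨-, q, ⟨a, ha, rfl⟩, hne, h1, h2⟩
    refine ⟨pvBound a.2.2.2, ⟨a, ha, rfl⟩, ?_⟩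
    rw [Ne, Prod.ext_iff, not_and_or] at hne
    rcases hne with h | h <;> [right; left] <;> exact ⟨by omega, by omega⟩

-- ===== VERDICT (by name: the statement is the Claim_ definition above) =====
theorem only_longest_spec : Claim_equal_only_longest := by
  intro ents _ _
  unfold Spec_only_longest
  simp only [only_longest, only_longest_alt]
  rw [pvFoldl_filter]
  simp only [List.nil_append]
  refine List.filter_congr fun kv hkv => ?_
  rw [pvAny_eq_contains ents kv hkv]
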